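-- pv_equiv track=rewrite | github.com/MSGitt/Coding-Study | 프로그래머스/lv3/12987. 숫자 게임/숫자 게임.py | solution
-- ===== SOURCE A (Python) =====
-- import heapq
--
-- def solution(A, B):
--
--     answer = 0
--
--     A = [-i for i in A]
--     B = [-i for i in B]
--
--     heapq.heapify(A)
--     heapq.heapify(B)
--
--     while A and B :
--         temp1 = -heapq.heappop(A)
--         temp2 = -heapq.heappop(B)
--
--         if temp2 > temp1 :
--             answer += 1
--
--         else :
--             heapq.heappush(B, -temp2)
--
--     return answer
-- ===== SOURCE B (Python) =====
-- def solution(A, B):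
--     sa = sorted(A, reverse=True)
--     sb = sorted(B, reverse=True)
--     wins = 0
--     j = 0
--     for a in sa:
--         if j < len(sb) and sb[j] > a:
--             wins += 1
--             j += 1
--     return wins
-- ===== Notes on version B (the rewrite author's own statement) =====
-- stated objective: simpler
-- what changed: Replaced A's two negated min-heaps with per-iteration pop/push-back by one descending sort of each list and a single two-pointer scan counting wins.
import Mathlib
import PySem

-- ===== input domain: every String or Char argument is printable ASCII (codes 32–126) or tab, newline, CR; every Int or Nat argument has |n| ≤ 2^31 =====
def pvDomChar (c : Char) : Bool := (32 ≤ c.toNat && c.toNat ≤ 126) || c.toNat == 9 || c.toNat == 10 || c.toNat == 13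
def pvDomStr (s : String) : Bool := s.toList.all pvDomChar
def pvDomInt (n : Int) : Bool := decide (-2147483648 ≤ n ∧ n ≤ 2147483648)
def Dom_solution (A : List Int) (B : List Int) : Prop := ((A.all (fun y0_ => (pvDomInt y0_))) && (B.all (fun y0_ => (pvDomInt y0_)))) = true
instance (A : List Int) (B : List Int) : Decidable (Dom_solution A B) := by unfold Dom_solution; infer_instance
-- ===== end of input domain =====

-- B replaces A's two heaps (with pop and push-back) by one descending sort of each list
-- and a single two-pointer scan; objective: simpler.

-- ===== PORT A =====
-- Hand port of heapq (no PySem primitive): a heap-ordered binary tree with the minimum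
-- at the root. Value-exact: heapify/heappop/heappush pop exactly the same VALUES as
-- CPython's array heap (each pop returns the minimum value, push/heapify preserve the
-- multiset of stored values), and only popped values flow into A's result.
-- The Nat fuel arguments are totality guards only: they are always supplied large
-- enough that the 'out of fuel' branch is never reached.
inductive PyHeap where
  | nil : PyHeap
  | node : Int → PyHeap → PyHeap → PyHeap
deriving DecidableEq, Repr

def PyHeap.size : PyHeap → Nat
  | .nil => 0
  | .node _ l r => 1 + l.size + r.size

def PyHeap.mergeF : Nat → PyHeap → PyHeap → PyHeap
  | _, .nil, t => t
  | _, .node v l r, .nil => .node v l r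
  | 0, .node _ _ _, .node _ _ _ => .nil   -- out of fuel: never reached
  | f + 1, .node v1 l1 r1, .node v2 l2 r2 =>
    if v1 ≤ v2 then .node v1 (PyHeap.mergeF f r1 (.node v2 l2 r2)) l1
    else .node v2 (PyHeap.mergeF f (.node v1 l1 r1) r2) l2

def PyHeap.merge (a b : PyHeap) : PyHeap := PyHeap.mergeF (a.size + b.size) a b

-- heapq.heappush
def PyHeap.push (t : PyHeap) (x : Int) : PyHeap := t.merge (.node x .nil .nil)

-- heapq.heapify
def PyHeap.ofList (xs : List Int) : PyHeap := xs.foldl PyHeap.push .nil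

-- the 'while A and B' loop of A; each iteration pops the two minima inline
-- (root value + merge of the children = heappop)
def solutionLoopF : Nat → PyHeap → PyHeap → Int → Int
  | _, .nil, _, ans => ans
  | _, .node _ _ _, .nil, ans => ans
  | 0, .node _ _ _, .node _ _ _, ans => ans   -- out of fuel: never reached
  | f + 1, .node va la ra, .node vb lb rb, ans =>
    let temp1 := -va
    let temp2 := -vb
    if temp2 > temp1 then solutionLoopF f (la.merge ra) (lb.merge rb) (ans + 1)
    else solutionLoopF f (la.merge ra) ((lb.merge rb).push (-temp2)) ans

def solution (A : List Int) (B : List Int) : Int :=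
  let A' := A.map (fun i => -i)
  let B' := B.map (fun i => -i)
  let hA := PyHeap.ofList A'
  let hB := PyHeap.ofList B'
  solutionLoopF hA.size hA hB 0

-- ===== PORT B =====
-- the 'for a in sa' loop of Source B; sb.getD j 0 is Source B's sb[j], exact because the
-- guard j < len(sb) is checked first (short-circuit 'and')
def altLoop (sb : List Int) : List Int → Nat → Int → Int
  | [], _, wins => wins
  | a :: rest, j, wins =>
    if j < sb.length ∧ sb.getD j 0 > a then altLoop sb rest (j + 1) (wins + 1)
    else altLoop sb rest j wins

def solution_alt (A : List Int) (B : List Int) : Int :=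
  let sa := PySem.List.sorted A (fun x => x) true
  let sb := PySem.List.sorted B (fun x => x) true
  altLoop sb sa 0 0

-- ===== PRECONDITION & SPEC =====
def Spec_solution (A : List Int) (B : List Int) (out : Int) : Prop := out = solution_alt A B
instance (A : List Int) (B : List Int) (out : Int) : Decidable (Spec_solution A B out) := by unfold Spec_solution; infer_instance

-- ===== CLAIM (what is proved, stated in full; the proofs are below) =====
def Claim_equal_solution : Prop := ∀ (A : List Int) (B : List Int), Dom_solution A B → Spec_solution A B (solution A B)

-- ===== LEMMAS AND PROOFS =====

-- multiset of values stored in a heap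
def PyHeap.ms : PyHeap → Multiset Int
  | .nil => 0
  | .node v l r => v ::ₘ (l.ms + r.ms)

-- heap-order invariant: every root is ≤ all values below it
def PyHeap.IsHeap : PyHeap → Prop
  | .nil => True
  | .node v l r => (∀ x ∈ l.ms, v ≤ x) ∧ (∀ x ∈ r.ms, v ≤ x) ∧ l.IsHeap ∧ r.IsHeap

theorem PyHeap.root_le {v : Int} {l r : PyHeap} (h : (PyHeap.node v l r).IsHeap) :
    ∀ x ∈ (PyHeap.node v l r).ms, v ≤ x := by
  intro x hx
  simp [PyHeap.ms] at hx
  rcases hx with hx | hx | hx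
  · omega
  · exact h.1 x hx
  · exact h.2.1 x hx

theorem PyHeap.size_mergeF : ∀ (f : Nat) (a b : PyHeap), a.size + b.size ≤ f →
    (PyHeap.mergeF f a b).size = a.size + b.size := by
  intro f
  induction f with
  | zero =>
      intro a b hf
      cases a with
      | nil => simp [PyHeap.mergeF, PyHeap.size]
      | node v l r => simp [PyHeap.size] at hf
  | succ f ih =>
      intro a b hf
      cases a with
      | nil => simp [PyHeap.mergeF, PyHeap.size]
      | node v1 l1 r1 =>
        cases b with
        | nil => simp [PyHeap.mergeF, PyHeap.size]
        | node v2 l2 r2 =>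
          simp only [PyHeap.mergeF]
          split
          · simp only [PyHeap.size] at hf ⊢
            rw [ih r1 (.node v2 l2 r2) (by simp [PyHeap.size]; omega)]
            simp [PyHeap.size]; omega
          · simp only [PyHeap.size] at hf ⊢
            rw [ih (.node v1 l1 r1) r2 (by simp [PyHeap.size]; omega)]
            simp [PyHeap.size]; omega

theorem PyHeap.ms_mergeF : ∀ (f : Nat) (a b : PyHeap), a.size + b.size ≤ f →
    (PyHeap.mergeF f a b).ms = a.ms + b.ms := by
  intro f
  induction f with
  | zero =>
      intro a b hf
      cases a with
      | nil => simp [PyHeap.mergeF, PyHeap.ms]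
      | node v l r => simp [PyHeap.size] at hf
  | succ f ih =>
      intro a b hf
      cases a with
      | nil => simp [PyHeap.mergeF, PyHeap.ms]
      | node v1 l1 r1 =>
        cases b with
        | nil => simp [PyHeap.mergeF, PyHeap.ms]
        | node v2 l2 r2 =>
          simp only [PyHeap.mergeF]
          split
          · rw [PyHeap.ms, ih r1 (.node v2 l2 r2) (by simp [PyHeap.size] at hf ⊢; omega)]
            simp only [PyHeap.ms, ← Multiset.singleton_add]
            abel
          · rw [PyHeap.ms, ih (.node v1 l1 r1) r2 (by simp [PyHeap.size] at hf ⊢; omega)]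
            simp only [PyHeap.ms, ← Multiset.singleton_add]
            abel

theorem PyHeap.ms_merge (a b : PyHeap) : (a.merge b).ms = a.ms + b.ms :=
  PyHeap.ms_mergeF _ a b le_rfl

theorem PyHeap.size_merge (a b : PyHeap) : (a.merge b).size = a.size + b.size :=
  PyHeap.size_mergeF _ a b le_rfl

theorem PyHeap.isHeap_mergeF : ∀ (f : Nat) (a b : PyHeap), a.size + b.size ≤ f →
    a.IsHeap → b.IsHeap → (PyHeap.mergeF f a b).IsHeap := by
  intro f
  induction f with
  | zero =>
      intro a b hf ha hb
      cases a with
      | nil => simpa [PyHeap.mergeF]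
      | node v l r => simp [PyHeap.size] at hf
  | succ f ih =>
      intro a b hf ha hb
      cases a with
      | nil => simpa [PyHeap.mergeF]
      | node v1 l1 r1 =>
        cases b with
        | nil => simpa [PyHeap.mergeF]
        | node v2 l2 r2 =>
          simp only [PyHeap.mergeF]
          split
          · rename_i h
            refine ⟨?_, ha.1, ih r1 _ (by simp [PyHeap.size] at hf ⊢; omega) ha.2.2.2 hb,
              ha.2.2.1⟩
            intro x hx
            rw [PyHeap.ms_mergeF f r1 _ (by simp [PyHeap.size] at hf ⊢; omega)] at hx
            rcases Multiset.mem_add.mp hx with hx | hx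
            · exact ha.2.1 x hx
            · exact le_trans h (PyHeap.root_le hb x hx)
          · rename_i h
            refine ⟨?_, hb.1, ih _ r2 (by simp [PyHeap.size] at hf ⊢; omega) ha hb.2.2.2,
              hb.2.2.1⟩
            intro x hx
            rw [PyHeap.ms_mergeF f _ r2 (by simp [PyHeap.size] at hf ⊢; omega)] at hx
            rcases Multiset.mem_add.mp hx with hx | hx
            · exact le_trans (not_le.mp h).le (PyHeap.root_le ha x hx)
            · exact hb.2.1 x hx

theorem PyHeap.isHeap_merge {a b : PyHeap} (ha : a.IsHeap) (hb : b.IsHeap) :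
    (a.merge b).IsHeap :=
  PyHeap.isHeap_mergeF _ a b le_rfl ha hb

theorem PyHeap.isHeap_push {t : PyHeap} (ht : t.IsHeap) (x : Int) : (t.push x).IsHeap := by
  refine PyHeap.isHeap_merge ht ?_
  simp [PyHeap.IsHeap, PyHeap.ms]

theorem PyHeap.ms_push (t : PyHeap) (x : Int) : (t.push x).ms = x ::ₘ t.ms := by
  rw [PyHeap.push, PyHeap.ms_merge]
  simp [PyHeap.ms]
  rw [add_comm]
  rfl

theorem PyHeap.ofList_aux (xs : List Int) (t : PyHeap) (ht : t.IsHeap) :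
    (xs.foldl PyHeap.push t).IsHeap ∧ (xs.foldl PyHeap.push t).ms = t.ms + ↑xs := by
  induction xs generalizing t with
  | nil => simpa using ht
  | cons x xs ih =>
      rcases ih (t.push x) (PyHeap.isHeap_push ht x) with ⟨h1, h2⟩
      refine ⟨h1, ?_⟩
      rw [List.foldl_cons] at *
      rw [h2, PyHeap.ms_push]
      rw [show ((x :: xs : List Int) : Multiset Int) = x ::ₘ (↑xs : Multiset Int) from rfl]
      simp only [← Multiset.singleton_add]
      abel

theorem PyHeap.isHeap_ofList (xs : List Int) : (PyHeap.ofList xs).IsHeap :=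
  (PyHeap.ofList_aux xs .nil trivial).1

theorem PyHeap.ms_ofList (xs : List Int) : (PyHeap.ofList xs).ms = ↑xs := by
  have := (PyHeap.ofList_aux xs .nil trivial).2
  simpa [PyHeap.ms] using this

theorem PyHeap.ms_eq_zero {t : PyHeap} (h : t.ms = 0) : t = PyHeap.nil := by
  cases t with
  | nil => rfl
  | node v l r => simp [PyHeap.ms] at h

-- abstract greedy loop over the (negated) sorted value sequences
def dLoop : List Int → List Int → Int → Int
  | [], _, ans => ans
  | _ :: _, [], ans => ans
  | a :: as, b :: bs, ans => if b > a then dLoop as bs (ans + 1) else dLoop as (b :: bs) ans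

theorem dLoop_nil_right (l : List Int) (ans : Int) : dLoop l [] ans = ans := by
  cases l <;> rfl

-- A's heap loop follows the sorted value sequences of the two heaps
theorem sim_lemma (sa : List Int) : ∀ (f : Nat) (hA hB : PyHeap) (ans : Int) (sbl : List Int),
    hA.size ≤ f →
    hA.IsHeap → hB.IsHeap → (↑sa : Multiset Int) = hA.ms → sa.Pairwise (· ≤ ·) →
    (↑sbl : Multiset Int) = hB.ms → sbl.Pairwise (· ≤ ·) →
    solutionLoopF f hA hB ans
      = dLoop (sa.map (fun x => -x)) (sbl.map (fun x => -x)) ans := by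
  induction sa with
  | nil =>
      intro f hA hB ans sbl _ _ _ hmsA _ _ _
      have : hA = PyHeap.nil := PyHeap.ms_eq_zero (by simpa using hmsA.symm)
      subst this
      cases f <;> simp [solutionLoopF, dLoop]
  | cons na sa' ih =>
      intro f hA hB ans sbl hf hHA hHB hmsA hsortA hmsB hsortB
      cases hA with
      | nil => simp [PyHeap.ms] at hmsA
      | node va la ra =>
        obtain ⟨f', rfl⟩ : ∃ f', f = f' + 1 := by
          cases f with
          | zero => simp [PyHeap.size] at hf
          | succ f' => exact ⟨f', rfl⟩
        have hva : va = na := by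
          have h1 : na ≤ va := by
            have hva_mem : va ∈ (↑(na :: sa') : Multiset Int) := by
              rw [hmsA]; simp [PyHeap.ms]
            rcases (by simpa using hva_mem : va = na ∨ va ∈ sa') with h | h
            · omega
            · exact (List.rel_of_pairwise_cons hsortA) h
          have h2 : va ≤ na := by
            refine PyHeap.root_le hHA na ?_
            rw [← hmsA]; simp
          omega
        subst hva
        have hmsA' : (↑sa' : Multiset Int) = (la.merge ra).ms := by
          rw [PyHeap.ms_merge]
          have : va ::ₘ (↑sa' : Multiset Int) = va ::ₘ (la.ms + ra.ms) := by
            simpa [PyHeap.ms] using hmsA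
          exact (Multiset.cons_inj_right va).mp this
        have hf' : (la.merge ra).size ≤ f' := by
          rw [PyHeap.size_merge]
          simp [PyHeap.size] at hf
          omega
        cases sbl with
        | nil =>
            have : hB = PyHeap.nil := PyHeap.ms_eq_zero (by simpa using hmsB.symm)
            subst this
            simp [solutionLoopF, dLoop]
        | cons nb sbl' =>
          cases hB with
          | nil => simp [PyHeap.ms] at hmsB
          | node vb lb rb =>
            have hvb : vb = nb := by
              have h1 : nb ≤ vb := by
                have hvb_mem : vb ∈ (↑(nb :: sbl') : Multiset Int) := by
                  rw [hmsB]; simp [PyHeap.ms]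
                rcases (by simpa using hvb_mem : vb = nb ∨ vb ∈ sbl') with h | h
                · omega
                · exact (List.rel_of_pairwise_cons hsortB) h
              have h2 : vb ≤ nb := by
                refine PyHeap.root_le hHB nb ?_
                rw [← hmsB]; simp
              omega
            subst hvb
            have hmsB' : (↑sbl' : Multiset Int) = (lb.merge rb).ms := by
              rw [PyHeap.ms_merge]
              have : vb ::ₘ (↑sbl' : Multiset Int) = vb ::ₘ (lb.ms + rb.ms) := by
                simpa [PyHeap.ms] using hmsB
              exact (Multiset.cons_inj_right vb).mp this
            have hHA' : (la.merge ra).IsHeap := PyHeap.isHeap_merge hHA.2.2.1 hHA.2.2.2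
            have hHB' : (lb.merge rb).IsHeap := PyHeap.isHeap_merge hHB.2.2.1 hHB.2.2.2
            by_cases hcmp : -vb > -va
            · rw [solutionLoopF]
              simp only [if_pos hcmp]
              rw [ih f' (la.merge ra) (lb.merge rb) (ans + 1) sbl' hf' hHA' hHB' hmsA'
                    (List.Pairwise.of_cons hsortA) hmsB' (List.Pairwise.of_cons hsortB)]
              simp only [List.map_cons]
              rw [dLoop, if_pos hcmp]
            · rw [solutionLoopF]
              simp only [if_neg hcmp]
              have hpush : ((lb.merge rb).push (-(-vb))).IsHeap :=
                PyHeap.isHeap_push hHB' _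
              have hmsPush : (↑(vb :: sbl') : Multiset Int)
                  = ((lb.merge rb).push (-(-vb))).ms := by
                rw [PyHeap.ms_push, neg_neg, ← hmsB']
                rfl
              rw [ih f' (la.merge ra) ((lb.merge rb).push (-(-vb))) ans (vb :: sbl') hf'
                    hHA' hpush hmsA' (List.Pairwise.of_cons hsortA) hmsPush hsortB]
              simp only [List.map_cons]
              rw [dLoop, if_neg hcmp]

-- B's indexed loop equals dLoop on the remaining suffix of sb
theorem alt_lemma (sbd : List Int) : ∀ (sad : List Int) (j : Nat) (wins : Int),
    j ≤ sbd.length → altLoop sbd sad j wins = dLoop sad (sbd.drop j) wins := by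
  intro sad
  induction sad with
  | nil => intro j wins _; cases h : sbd.drop j <;> simp [altLoop, dLoop]
  | cons a rest ih =>
      intro j wins hj
      by_cases hlt : j < sbd.length
      · have hdrop : sbd.drop j = sbd[j] :: sbd.drop (j + 1) := by
          exact (List.getElem_cons_drop hlt).symm
        have hgetD : sbd.getD j 0 = sbd[j] := by
          simp [List.getD, List.getElem?_eq_getElem hlt]
        by_cases hwin : sbd.getD j 0 > a
        · rw [altLoop, if_pos ⟨hlt, hwin⟩, ih (j + 1) (wins + 1) (by omega), hdrop,
            dLoop, if_pos (by rw [hgetD] at hwin; exact hwin)]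
        · rw [altLoop, if_neg (by tauto), ih j wins hj, hdrop, dLoop,
            if_neg (by rw [hgetD] at hwin; exact hwin), ← hdrop]
      · have hj' : j = sbd.length := by omega
        rw [altLoop, if_neg (fun h => hlt h.1), ih j wins hj, hj', List.drop_length,
          dLoop_nil_right, dLoop_nil_right]

-- the descending sort of A is the negation of the ascending sort of the negations
theorem sorted_rev_eq_neg_sorted_neg (A : List Int) :
    (PySem.List.sorted (A.map (fun i => -i)) (fun x => x) false).map (fun x => -x)
      = PySem.List.sorted A (fun x => x) true := by
  apply PySem.List.eq_of_perm_of_pairwise_le_of_injective (key := fun x : Int => -x)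
    (by intro a b h; simpa using h)
  · refine List.Perm.trans (List.Perm.map _ (PySem.List.sorted_perm _ _ _)) ?_
    refine List.Perm.trans ?_ (PySem.List.sorted_perm _ _ _).symm
    simp [List.map_map]
  · have h := PySem.List.sorted_pairwise (A.map (fun i => -i)) (fun x : Int => x)
    rw [List.pairwise_map]
    exact h.imp (by intro a b hab; simpa using hab)
  · have h := PySem.List.sorted_pairwise_rev A (fun x : Int => x)
    exact h.imp (by intro a b hab; simpa using hab)

theorem solution_eq_dLoop (A B : List Int) :
    solution A B
      = dLoop ((PySem.List.sorted A (fun x => x) true))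
              ((PySem.List.sorted B (fun x => x) true)) 0 := by
  rw [solution]
  rw [← sorted_rev_eq_neg_sorted_neg A, ← sorted_rev_eq_neg_sorted_neg B]
  exact sim_lemma _ _ _ _ 0 _ le_rfl
    (PyHeap.isHeap_ofList _) (PyHeap.isHeap_ofList _)
    (by rw [PyHeap.ms_ofList]; exact Multiset.coe_eq_coe.mpr (PySem.List.sorted_perm _ _ _))
    (PySem.List.sorted_pairwise (A.map (fun i => -i)) (fun x : Int => x))
    (by rw [PyHeap.ms_ofList]; exact Multiset.coe_eq_coe.mpr (PySem.List.sorted_perm _ _ _))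
    (PySem.List.sorted_pairwise (B.map (fun i => -i)) (fun x : Int => x))

-- ===== VERDICT (by name: the statement is the Claim_ definition above) =====
theorem solution_spec : Claim_equal_solution := by
  intro A B _
  unfold Spec_solution solution_alt
  rw [solution_eq_dLoop, alt_lemma _ _ 0 0 (by omega)]
  rfl
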